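-- pv_equiv track=rewrite | github.com/aswathas/Project-Hail-Mary | chainsentinel/detection/signal_engine.py | build_esql_query
-- ===== SOURCE A (Python) =====
-- def build_esql_query(raw_query: str, investigation_id: str) -> str:
--     """
--     Inject investigation_id filter into an ES|QL query.
--     Inserts after the FROM clause.
--     """
--     lines = raw_query.strip().splitlines()
--     result = []
--     from_seen = False
--
--     for line in lines:
--         stripped = line.strip()
--         # Skip comment lines
--         if stripped.startswith("--"):
--             continue
--
--         result.append(line)
--
--         # After the FROM line, inject investigation_id filter
--         if not from_seen and stripped.upper().startswith("FROM "):
--             from_seen = True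
--             result.append(
--                 f'| WHERE investigation_id == "{investigation_id}"'
--             )
--
--     return "\n".join(result)
-- ===== SOURCE B (Python) =====
-- def build_esql_query(raw_query: str, investigation_id: str) -> str:
--     # Pass 1: drop comment lines. Pass 2: find the first FROM line and splice the filter after it.
--     kept = [line for line in raw_query.strip().splitlines()
--             if not line.strip().startswith("--")]
--     idx = next((i for i, line in enumerate(kept)
--                 if line.strip().upper().startswith("FROM ")), None)
--     if idx is not None:
--         kept = kept[:idx + 1] + [f'| WHERE investigation_id == "{investigation_id}"'] + kept[idx + 1:]
--     return "\n".join(kept)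
-- ===== Notes on version B (the rewrite author's own statement) =====
-- stated objective: alternative
-- what changed: Replaces A's single flag-driven loop with two separate passes: a comprehension that removes comment lines, then an index search for the first FROM line with a slice-based splice of the WHERE filter.
import Mathlib
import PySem

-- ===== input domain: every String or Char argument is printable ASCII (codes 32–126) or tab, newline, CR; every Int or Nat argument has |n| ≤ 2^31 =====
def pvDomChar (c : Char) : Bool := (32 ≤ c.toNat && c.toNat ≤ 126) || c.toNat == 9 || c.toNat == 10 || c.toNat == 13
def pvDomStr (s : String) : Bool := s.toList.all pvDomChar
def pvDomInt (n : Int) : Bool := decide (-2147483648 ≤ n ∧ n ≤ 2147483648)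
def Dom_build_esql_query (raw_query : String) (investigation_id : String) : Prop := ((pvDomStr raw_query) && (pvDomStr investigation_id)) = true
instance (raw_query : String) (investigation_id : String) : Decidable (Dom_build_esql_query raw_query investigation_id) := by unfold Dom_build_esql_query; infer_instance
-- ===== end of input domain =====

-- B replaces A's single flag-driven loop by two passes: filter out comment lines, then find the
-- first FROM line and splice the WHERE filter after it (objective: alternative decomposition).

-- shared predicates / the injected filter line (Python's inline tests and f-string, named)
def isComment (l : String) : Bool := PySem.Str.startswith (PySem.Str.strip l) "--"
def isFrom (l : String) : Bool := PySem.Str.startswith (PySem.Str.upper (PySem.Str.strip l)) "FROM "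
def whereLine (investigation_id : String) : String :=
  "| WHERE investigation_id == \"" ++ investigation_id ++ "\""

-- ===== PORT A =====
-- A's for-loop over lines carrying (result, from_seen), transcribed as structural recursion
def loopA (w : String) : List String → List String → Bool → List String
  | [], result, _ => result
  | line :: rest, result, from_seen =>
    if isComment line then
      loopA w rest result from_seen
    else
      if !from_seen && isFrom line then
        loopA w rest (result ++ [line, w]) true
      else
        loopA w rest (result ++ [line]) from_seen

def build_esql_query (raw_query : String) (investigation_id : String) : String :=
  let lines := PySem.Str.splitlines (PySem.Str.strip raw_query)
  PySem.Str.join "\n" (loopA (whereLine investigation_id) lines [] false)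

-- ===== PORT B =====
-- index of the first line whose stripped, uppercased form starts with "FROM " (B's next(enumerate…))
def firstFromIdx : List String → Option Nat
  | [] => none
  | line :: rest => if isFrom line then some 0 else (firstFromIdx rest).map (· + 1)

def build_esql_query_alt (raw_query : String) (investigation_id : String) : String :=
  let kept := (PySem.Str.splitlines (PySem.Str.strip raw_query)).filter (fun l => !isComment l)
  let out := match firstFromIdx kept with
    | some i => kept.take (i + 1) ++ [whereLine investigation_id] ++ kept.drop (i + 1)
    | none => kept
  PySem.Str.join "\n" out

-- ===== PRECONDITION & SPEC =====
def Spec_build_esql_query (raw_query : String) (investigation_id : String) (out : String) : Prop := out = build_esql_query_alt raw_query investigation_id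
instance (raw_query : String) (investigation_id : String) (out : String) : Decidable (Spec_build_esql_query raw_query investigation_id out) := by unfold Spec_build_esql_query; infer_instance

-- ===== CLAIM (what is proved, stated in full; the proofs are below) =====
def Claim_equal_build_esql_query : Prop := ∀ (raw_query : String) (investigation_id : String), Dom_build_esql_query raw_query investigation_id → Spec_build_esql_query raw_query investigation_id (build_esql_query raw_query investigation_id)

-- ===== LEMMAS AND PROOFS =====

-- splice w after the first FROM line (proof-side middleman between the two formulations)
def spliceFrom (w : String) : List String → List String
  | [] => []
  | l :: rest => if isFrom l then l :: w :: rest else l :: spliceFrom w rest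

theorem loopA_true (w : String) (lines : List String) (res : List String) :
    loopA w lines res true = res ++ lines.filter (fun l => !isComment l) := by
  induction lines generalizing res with
  | nil => simp [loopA]
  | cons l rest ih =>
    simp only [loopA]
    split_ifs with h h2
    · simp [ih, h]
    · simp at h2
    · simp [ih, h]

theorem loopA_false (w : String) (lines : List String) (res : List String) :
    loopA w lines res false =
      res ++ spliceFrom w (lines.filter (fun l => !isComment l)) := by
  induction lines generalizing res with
  | nil => simp [loopA, spliceFrom]
  | cons l rest ih =>
    simp only [loopA]
    split_ifs with h1 h2
    · simp [ih, h1]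
    · simp only [Bool.not_false, Bool.true_and] at h2
      simp [loopA_true, h1, h2, spliceFrom]
    · simp only [Bool.not_false, Bool.true_and] at h2
      simp [ih, h1, h2, spliceFrom]

theorem spliceFrom_eq_splice (w : String) (kept : List String) :
    (match firstFromIdx kept with
      | some i => kept.take (i + 1) ++ [w] ++ kept.drop (i + 1)
      | none => kept) = spliceFrom w kept := by
  induction kept with
  | nil => simp [firstFromIdx, spliceFrom]
  | cons l rest ih =>
    simp only [firstFromIdx, spliceFrom]
    split_ifs with h
    · simp
    · cases hf : firstFromIdx rest with
      | none => simpa [hf] using ih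
      | some j =>
        simp only [hf, Option.map_some] at ih ⊢
        simp only [List.take_succ_cons, List.drop_succ_cons, List.cons_append, ih]

-- ===== VERDICT (by name: the statement is the Claim_ definition above) =====
theorem build_esql_query_spec : Claim_equal_build_esql_query := by
  intro raw_query investigation_id _
  unfold Spec_build_esql_query build_esql_query build_esql_query_alt
  simp only [loopA_false, List.nil_append, ← spliceFrom_eq_splice]
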